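-- pv_equiv track=rewrite | github.com/Dannypa/TagSystem | tag_system_db.py | extract_tag
-- ===== SOURCE A (Python) =====
-- def extract_tag(s:str):
--     n = len(s)
--     i = 0
--     while i < n and s[i] != '\'':
--         i += 1
--     if i == n:
--         return ''
--     i += 1
--     tag = []
--     while i < n and s[i] != '\'':
--         tag.append(s[i])
--         i += 1
--     return ''.join(tag)
-- ===== SOURCE B (Python) =====
-- def extract_tag(s: str):
--     parts = s.split("'")
--     return parts[1] if len(parts) > 1 else ''
-- ===== Notes on version B (the rewrite author's own statement) =====
-- stated objective: faster
-- what changed: Replaced the two hand-written index-scanning while loops and the list-accumulate-then-join with a single split on the quote character, returning the second segment (or '' when there is no quote).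
import Mathlib
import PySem

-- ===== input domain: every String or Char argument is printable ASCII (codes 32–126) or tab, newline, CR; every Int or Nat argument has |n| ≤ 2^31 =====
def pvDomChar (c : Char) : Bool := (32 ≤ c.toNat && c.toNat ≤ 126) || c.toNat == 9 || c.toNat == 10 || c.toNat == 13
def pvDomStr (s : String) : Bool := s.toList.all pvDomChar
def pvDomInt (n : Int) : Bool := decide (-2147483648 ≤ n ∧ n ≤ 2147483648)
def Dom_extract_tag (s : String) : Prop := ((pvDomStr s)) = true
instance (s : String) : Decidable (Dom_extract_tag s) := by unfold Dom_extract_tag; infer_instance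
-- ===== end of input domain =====

-- B replaces A's two hand-written scanning loops with one split on the quote,
-- returning the second segment; same values everywhere (faster in a timing run).

-- ===== PORT A =====
-- first while loop: advance past the first quote; returns the remainder after it,
-- or none when i reaches n with no quote found
def pvScan1 : List Char → Option (List Char)
  | [] => none
  | c :: rest => if c = '\'' then some rest else pvScan1 rest

-- second while loop: append characters into tag until the next quote or the end
def pvCollect : List Char → List Char
  | [] => []
  | c :: rest => if c = '\'' then [] else c :: pvCollect rest

def extract_tag (s : String) : String :=
  match pvScan1 s.toList with
  | none => ""                            -- if i == n: return ''
  | some r => String.ofList (pvCollect r) -- ''.join(tag)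

-- ===== PORT B =====
def extract_tag_alt (s : String) : String :=
  let parts := (PySem.Chars.splitOn s.toList "'".toList).map String.ofList
  if 1 < parts.length then parts[1]! else ""

-- ===== PRECONDITION & SPEC =====
def Spec_extract_tag (s : String) (out : String) : Prop := out = extract_tag_alt s
instance (s : String) (out : String) : Decidable (Spec_extract_tag s out) := by unfold Spec_extract_tag; infer_instance

-- ===== CLAIM (what is proved, stated in full; the proofs are below) =====
def Claim_equal_extract_tag : Prop := ∀ (s : String), Dom_extract_tag s → Spec_extract_tag s (extract_tag s)

-- ===== LEMMAS AND PROOFS =====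

-- structural (fuel-free) form of PySem.Chars.splitOn.go for the one-char separator '\''
def pvGoSimple : List Char → List Char → List (List Char)
  | [], cur => [cur.reverse]
  | c :: rest, cur => if c = '\'' then cur.reverse :: pvGoSimple rest [] else pvGoSimple rest (c :: cur)

theorem pvGo_eq (fuel : Nat) (l cur : List Char) (acc : List (List Char))
    (h : l.length ≤ fuel) :
    PySem.Chars.splitOn.go ['\''] fuel l cur acc = acc.reverse ++ pvGoSimple l cur := by
  induction fuel generalizing l cur acc with
  | zero =>
    interval_cases hl : l.length
    cases l with
    | nil => simp [PySem.Chars.splitOn.go, pvGoSimple]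
    | cons c rest => simp at hl
  | succ fuel ih =>
    cases l with
    | nil => simp [PySem.Chars.splitOn.go, pvGoSimple]
    | cons c rest =>
      simp only [List.length_cons, Nat.succ_le_succ_iff] at h
      by_cases hc : c = '\''
      · subst hc
        rw [show PySem.Chars.splitOn.go ['\''] (fuel+1) ('\'' :: rest) cur acc
              = PySem.Chars.splitOn.go ['\''] fuel rest [] (cur.reverse :: acc) by
            simp [PySem.Chars.splitOn.go, List.isPrefixOf]]
        rw [ih rest [] (cur.reverse :: acc) h]
        simp [pvGoSimple]
      · rw [show PySem.Chars.splitOn.go ['\''] (fuel+1) (c :: rest) cur acc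
              = PySem.Chars.splitOn.go ['\''] fuel rest (c :: cur) acc by
            simp [PySem.Chars.splitOn.go, List.isPrefixOf, Ne.symm hc]]
        rw [ih rest (c :: cur) acc h]
        simp [pvGoSimple, hc]

theorem pvSplitOn_eq (cs : List Char) :
    PySem.Chars.splitOn cs ['\''] = pvGoSimple cs [] := by
  unfold PySem.Chars.splitOn
  rw [pvGo_eq (cs.length + 1) cs [] [] (by omega)]
  simp

theorem pvGoSimple_eq_scan (cs cur : List Char) :
    pvGoSimple cs cur = match pvScan1 cs with
      | none => [cur.reverse ++ pvCollect cs]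
      | some r => (cur.reverse ++ pvCollect cs) :: pvGoSimple r [] := by
  induction cs generalizing cur with
  | nil => simp [pvGoSimple, pvScan1, pvCollect]
  | cons c rest ih =>
    by_cases hc : c = '\''
    · subst hc; simp [pvGoSimple, pvScan1, pvCollect]
    · simp only [pvGoSimple, pvScan1, pvCollect, if_neg hc]
      rw [ih (c :: cur)]
      cases pvScan1 rest <;> simp

theorem pvGoSimple_head (r : List Char) :
    (pvGoSimple r []).head? = some (pvCollect r) := by
  rw [pvGoSimple_eq_scan]
  cases pvScan1 r <;> simp

-- ===== VERDICT (by name: the statement is the Claim_ definition above) =====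
theorem extract_tag_spec : Claim_equal_extract_tag := by
  intro s _
  unfold Spec_extract_tag extract_tag extract_tag_alt
  have hq : "'".toList = ['\''] := rfl
  rw [hq, pvSplitOn_eq, pvGoSimple_eq_scan s.toList []]
  cases hscan : pvScan1 s.toList with
  | none => simp
  | some r =>
    have hh := pvGoSimple_head r
    cases hg : pvGoSimple r [] with
    | nil => simp [hg] at hh
    | cons p ps =>
      rw [hg] at hh
      simp at hh
      simp [hg, hh]
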